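-- pv_equiv track=rewrite | github.com/reginaib/Programming | Series_06/single-nucleotide polymorphism.py | SNP
-- ===== SOURCE A (Python) =====
-- def SNP(seq1, seq2):
--
--     """
--     >>> SNP('AAGCCTA', 'AAGCTTA')
--     (4, 'C', 'T')
--     >>> SNP('AAGCCTAA', 'AAGCTTA')
--     >>> SNP('AAGCTTA', 'AAGCTTA')
--     >>> SNP('AAGCCCA', 'AAGCTTA')
--     """
--
--     # check whether sequences have equal length
--     if len(seq1) != len(seq2):
--         return None
--
--     # check whether sequences differ at exactly one position
--     SNP = None
--     for index, (base1, base2) in enumerate(zip(seq1.upper(), seq2.upper())):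
--         if base1 != base2:
--             if SNP is None:
--                 # first position where both sequences differ
--                 SNP = (index, base1, base2)
--             else:
--                 # second position where both sequences differ
--                 return None
--
--     # return position where both sequences differ (if unique and existing)
--     return SNP
-- ===== SOURCE B (Python) =====
-- def SNP(seq1, seq2):
--     if len(seq1) != len(seq2):
--         return None
--     u1, u2 = seq1.upper(), seq2.upper()
--     if u1 == u2:
--         return None
--     i = 0
--     while u1[i] == u2[i]:
--         i += 1
--     if u1[i+1:] == u2[i+1:]:
--         return (i, u1[i], u2[i])
--     return None
-- ===== Notes on version B (the rewrite author's own statement) =====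
-- stated objective: alternative
-- what changed: Instead of scanning with a mismatch accumulator, B tests whole-string equality first, then locates only the FIRST mismatching index and decides by comparing the two suffixes after it for equality, never examining or counting further mismatches itself.
import Mathlib
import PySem

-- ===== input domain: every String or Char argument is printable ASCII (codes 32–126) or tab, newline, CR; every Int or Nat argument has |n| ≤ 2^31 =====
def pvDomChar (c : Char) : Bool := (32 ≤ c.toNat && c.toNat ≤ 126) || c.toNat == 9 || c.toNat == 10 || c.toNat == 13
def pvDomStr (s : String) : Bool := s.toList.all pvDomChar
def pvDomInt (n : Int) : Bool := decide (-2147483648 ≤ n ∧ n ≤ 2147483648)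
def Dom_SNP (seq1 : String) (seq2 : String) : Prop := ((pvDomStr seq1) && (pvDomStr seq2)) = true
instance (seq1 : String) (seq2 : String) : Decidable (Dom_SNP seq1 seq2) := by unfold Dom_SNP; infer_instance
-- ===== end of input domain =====

-- B decides by whole-string equality, first-mismatch search, and suffix equality after it,
-- instead of A's one-pass mismatch accumulator with early return (objective: alternative).


-- ===== PORT A =====
-- A's loop: state is the optional first mismatch; a second mismatch returns None immediately.
def SNP.loop : List (Int × Char × Char) → Option (Int × String × String) → Option (Int × String × String)
  | [], acc => acc
  | (i, b1, b2) :: rest, acc =>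
    if b1 ≠ b2 then
      match acc with
      | none => SNP.loop rest (some (i, String.ofList [b1], String.ofList [b2]))
      | some _ => none
    else
      SNP.loop rest acc

def SNP (seq1 : String) (seq2 : String) : Option (Int × String × String) :=
  if PySem.Str.len seq1 ≠ PySem.Str.len seq2 then
    none
  else
    SNP.loop (PySem.List.enumerate (List.zip (PySem.Str.upper seq1).toList (PySem.Str.upper seq2).toList) 0) none

-- ===== PORT B =====
-- B's while loop: advance i while characters agree; returns the first mismatch with the
-- remaining suffixes (the suffixes stand for Python's u1[i+1:], u2[i+1:]).
def SNP_alt.firstDiff : Int → List Char → List Char → Option (Int × Char × Char × List Char × List Char)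
  | _, [], _ => none
  | _, _, [] => none
  | i, c1 :: r1, c2 :: r2 =>
    if c1 == c2 then SNP_alt.firstDiff (i + 1) r1 r2
    else some (i, c1, c2, r1, r2)

def SNP_alt (seq1 : String) (seq2 : String) : Option (Int × String × String) :=
  if PySem.Str.len seq1 ≠ PySem.Str.len seq2 then
    none
  else
    let u1 := (PySem.Str.upper seq1).toList
    let u2 := (PySem.Str.upper seq2).toList
    if u1 == u2 then
      none
    else
      match SNP_alt.firstDiff 0 u1 u2 with
      | none => none   -- unreachable: u1 ≠ u2 with equal lengths has a first mismatch
      | some (i, c1, c2, r1, r2) =>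
        if r1 == r2 then some (i, String.ofList [c1], String.ofList [c2]) else none

-- ===== PRECONDITION & SPEC =====
def Spec_SNP (seq1 : String) (seq2 : String) (out : Option (Int × String × String)) : Prop := out = SNP_alt seq1 seq2
instance (seq1 : String) (seq2 : String) (out : Option (Int × String × String)) : Decidable (Spec_SNP seq1 seq2 out) := by unfold Spec_SNP; infer_instance

-- ===== CLAIM =====
def Claim_equal_SNP : Prop := ∀ (seq1 : String) (seq2 : String), Dom_SNP seq1 seq2 → Spec_SNP seq1 seq2 (SNP seq1 seq2)

-- ===== LEMMAS AND PROOFS =====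

theorem SNP.loop_some (zs : List (Int × Char × Char)) (s : Int × String × String) :
    SNP.loop zs (some s) =
      match zs.filter (fun p => p.2.1 != p.2.2) with
      | [] => some s
      | _ :: _ => none := by
  induction zs with
  | nil => rfl
  | cons z rest ih =>
    obtain ⟨i, b1, b2⟩ := z
    by_cases h : b1 = b2
    · simp [SNP.loop, List.filter, h, ih]
    · have hb : (b1 != b2) = true := by simp [h]
      simp [SNP.loop, List.filter, h, hb]

-- no-mismatch characterisation: with equal lengths, no filtered pair iff the lists are equal
theorem SNP.filter_nil_iff (t1 t2 : List Char) (k : Int) (hlen : t1.length = t2.length) :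
    ((PySem.List.enumerate (List.zip t1 t2) k).filter (fun p => p.2.1 != p.2.2) = []) ↔ t1 = t2 := by
  induction t1 generalizing t2 k with
  | nil =>
    cases t2 with
    | nil => simp
    | cons c2 r2 => simp at hlen
  | cons c1 r1 ih =>
    cases t2 with
    | nil => simp at hlen
    | cons c2 r2 =>
      simp only [List.length_cons, Nat.add_right_cancel_iff] at hlen
      by_cases h : c1 = c2
      · simp [PySem.List.enumerate_cons, h, ih r2 (k+1) hlen]
      · have hb : (c1 != c2) = true := by simp [h]
        simp [PySem.List.enumerate_cons, hb, h]

-- main bridge: A's loop on the enumerated zip equals B's first-mismatch + suffix-equality decision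
theorem SNP.loop_eq_firstDiff (t1 t2 : List Char) (k : Int) (hlen : t1.length = t2.length) :
    SNP.loop (PySem.List.enumerate (List.zip t1 t2) k) none =
      (match SNP_alt.firstDiff k t1 t2 with
       | none => none
       | some (i, c1, c2, r1, r2) =>
         if r1 == r2 then some (i, String.ofList [c1], String.ofList [c2]) else none) := by
  induction t1 generalizing t2 k with
  | nil =>
    cases t2 with
    | nil => rfl
    | cons c2 r2 => simp at hlen
  | cons c1 r1 ih =>
    cases t2 with
    | nil => simp at hlen
    | cons c2 r2 =>
      simp only [List.length_cons, Nat.add_right_cancel_iff] at hlen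
      by_cases h : c1 = c2
      · simp [PySem.List.enumerate_cons, SNP.loop, SNP_alt.firstDiff, h, ih r2 (k+1) hlen]
      · have hb : (c1 == c2) = false := by simp [h]
        simp only [List.zip_cons_cons, PySem.List.enumerate_cons, SNP.loop, h, ne_eq,
          not_false_iff, if_pos, SNP.loop_some, SNP_alt.firstDiff, hb, Bool.false_eq_true,
          if_neg]
        by_cases hr : r1 = r2
        · rw [(SNP.filter_nil_iff r1 r2 (k+1) hlen).mpr hr]
          simp [hr]
        · have : ¬ ((PySem.List.enumerate (List.zip r1 r2) (k+1)).filter (fun p => p.2.1 != p.2.2) = []) := by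
            rw [SNP.filter_nil_iff r1 r2 (k+1) hlen]; exact hr
          cases hrest : (PySem.List.enumerate (List.zip r1 r2) (k+1)).filter (fun p => p.2.1 != p.2.2) with
          | nil => exact absurd hrest this
          | cons d ds => simp [hr]

-- equal lists have no first mismatch
theorem SNP_alt.firstDiff_self (l : List Char) (k : Int) : SNP_alt.firstDiff k l l = none := by
  induction l generalizing k with
  | nil => rfl
  | cons c r ih => simp [SNP_alt.firstDiff, ih]

-- ===== VERDICT =====
theorem SNP_spec : Claim_equal_SNP := by
  intro seq1 seq2 _
  unfold Spec_SNP SNP SNP_alt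
  simp only [PySem.Str.len_eq, PySem.Str.toList_upper, ne_eq, Nat.cast_inj]
  by_cases hlen : seq1.toList.length = seq2.toList.length
  · have hl : (PySem.Chars.upper seq1.toList).length = (PySem.Chars.upper seq2.toList).length := by
      simp [PySem.Chars.upper, hlen]
    simp only [hlen, not_true_eq_false, if_false]
    rw [SNP.loop_eq_firstDiff _ _ 0 hl]
    by_cases heq : PySem.Chars.upper seq1.toList = PySem.Chars.upper seq2.toList
    · simp [heq, SNP_alt.firstDiff_self]
    · rw [if_neg (by simpa using heq)]
  · simp_all
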